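-- pv_equiv track=rewrite | github.com/YoongeonChoi/stock-predict | backend/app/services/market/universe.py | sample_universe_pairs
-- ===== SOURCE A (Python) =====
-- def sample_universe_pairs(universe: dict[str, list[str]], limit: int) -> list[tuple[str, str]]:
--     if limit <= 0:
--         return []
--     sector_names = list(universe.keys())
--     offsets = {sector: 0 for sector in sector_names}
--     sampled: list[tuple[str, str]] = []
--     seen: set[str] = set()
--
--     while len(sampled) < limit:
--         advanced = False
--         for sector in sector_names:
--             tickers = universe.get(sector) or []
--             index = offsets[sector]
--             while index < len(tickers) and tickers[index] in seen:
--                 index += 1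
--             offsets[sector] = index
--             if index >= len(tickers):
--                 continue
--             ticker = tickers[index]
--             offsets[sector] = index + 1
--             seen.add(ticker)
--             sampled.append((sector, ticker))
--             advanced = True
--             if len(sampled) >= limit:
--                 break
--         if not advanced:
--             break
--
--     return sampled
-- ===== SOURCE B (Python) =====
-- def sample_universe_pairs(universe: dict[str, list[str]], limit: int) -> list[tuple[str, str]]:
--     if limit <= 0:
--         return []
--     # Rotating work queue of (sector, remaining tickers); the picked ticker is
--     # physically deleted from every remaining list, so no seen-set and no
--     # per-sector offsets are needed.
--     queue = [(sector, list(tickers or [])) for sector, tickers in universe.items()]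
--     sampled: list[tuple[str, str]] = []
--     while queue and len(sampled) < limit:
--         sector, tickers = queue.pop(0)
--         if not tickers:
--             continue
--         ticker = tickers[0]
--         sampled.append((sector, ticker))
--         queue = [(s, [x for x in ts if x != ticker]) for s, ts in queue]
--         queue.append((sector, [x for x in tickers[1:] if x != ticker]))
--     return sampled
-- ===== Notes on version B (the rewrite author's own statement) =====
-- stated objective: alternative
-- what changed: B replaces A's seen-set plus per-sector offset dict and per-round rescan by a rotating work queue of (sector, remaining-tickers) lists from which each picked ticker is physically deleted everywhere, so B keeps no seen-set, no offsets and no round/advanced bookkeeping.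
import Mathlib
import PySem

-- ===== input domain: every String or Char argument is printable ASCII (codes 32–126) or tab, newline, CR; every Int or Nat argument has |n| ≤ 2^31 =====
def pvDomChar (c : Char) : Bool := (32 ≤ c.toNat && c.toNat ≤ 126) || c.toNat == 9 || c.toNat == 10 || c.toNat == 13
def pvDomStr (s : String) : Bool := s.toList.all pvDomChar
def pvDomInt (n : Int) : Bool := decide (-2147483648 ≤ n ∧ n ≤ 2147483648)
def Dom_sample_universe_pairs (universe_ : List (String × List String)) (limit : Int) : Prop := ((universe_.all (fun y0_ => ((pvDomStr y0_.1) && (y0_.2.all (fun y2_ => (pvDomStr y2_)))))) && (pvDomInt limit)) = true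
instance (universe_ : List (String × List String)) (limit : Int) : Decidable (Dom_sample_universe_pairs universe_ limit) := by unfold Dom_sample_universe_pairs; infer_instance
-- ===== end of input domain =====

-- B replaces A's seen-set + per-sector offset dict + per-round rescan by a rotating work
-- queue of (sector, remaining tickers) from which each picked ticker is deleted everywhere.

-- ===== PORT A =====
-- inner skip: `while index < len(tickers) and tickers[index] in seen: index += 1`
def pvSkipA (tickers : List String) (seen : PySem.Set String) (index : Int) : Int :=
  if h : index < (tickers.length : Int) ∧ PySem.List.pyGetD tickers index "" ∈ seen then
    pvSkipA tickers seen (index + 1)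
  else index
termination_by ((tickers.length : Int) - index).toNat
decreasing_by omega

-- one pass of `for sector in sector_names: …` (returns offsets, seen, sampled, advanced;
-- a `break` simply stops the iteration — the `while` guard then ends the loop)
def pvRoundA (u : PySem.Dict String (List String)) (limit : Int) :
    List String → PySem.Dict String Int → PySem.Set String → List (String × String) → Bool →
    PySem.Dict String Int × PySem.Set String × List (String × String) × Bool
  | [], offsets, seen, sampled, advanced => (offsets, seen, sampled, advanced)
  | s :: rest, offsets, seen, sampled, advanced =>
      let tickers := (u.get? s).getD []   -- `universe.get(sector) or []` ([] is falsy, so `or []` is the identity on lists)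
      let index := pvSkipA tickers seen (offsets.getD s 0)   -- `offsets[sector]`: the key is always present
      let offsets := offsets.insert s index
      if (tickers.length : Int) ≤ index then
        pvRoundA u limit rest offsets seen sampled advanced
      else
        let ticker := PySem.List.pyGetD tickers index ""   -- `tickers[index]`, 0 ≤ index < len here
        let offsets := offsets.insert s (index + 1)
        let seen := seen.add ticker
        let sampled := sampled ++ [(s, ticker)]
        if limit ≤ (sampled.length : Int) then (offsets, seen, sampled, true)
        else pvRoundA u limit rest offsets seen sampled true

-- `while len(sampled) < limit: …` — fuel-bounded: each iteration but the last samples at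
-- least one new ticker under the `len(sampled) < limit` guard, so limit+1 rounds suffice
def pvLoopA (u : PySem.Dict String (List String)) (limit : Int) (names : List String) :
    Nat → PySem.Dict String Int → PySem.Set String → List (String × String) → List (String × String)
  | 0, _, _, sampled => sampled
  | fuel + 1, offsets, seen, sampled =>
      if (sampled.length : Int) < limit then
        match pvRoundA u limit names offsets seen sampled false with
        | (offsets', seen', sampled', advanced) =>
          if advanced then pvLoopA u limit names fuel offsets' seen' sampled' else sampled'
      else sampled

def sample_universe_pairs (universe_ : List (String × List String)) (limit : Int) : List (String × String) :=
  if limit ≤ 0 then []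
  else
    let u := PySem.Dict.ofList universe_
    let sector_names := u.keys
    let offsets := sector_names.foldl (fun d s => d.insert s (0 : Int)) PySem.Dict.empty
    pvLoopA u limit sector_names (limit.toNat + 1) offsets PySem.Set.empty []

-- ===== PORT B =====
-- `while queue and len(sampled) < limit: …` — pop the front entry, drop it if its list is
-- empty, otherwise emit its head ticker, delete that ticker from every remaining list and
-- from its own tail, and re-append the entry at the back.  Fuel-bounded: an iteration
-- either emits (at most limit times) or permanently drops a queue entry, and entries are
-- only added on emit, so len(queue) + 2*limit + 1 iterations suffice.
def pvLoopN (limit : Int) : Nat → List (String × List String) → List (String × String) → List (String × String)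
  | 0, _, sampled => sampled
  | _ + 1, [], sampled => sampled
  | fuel + 1, (_, []) :: rest, sampled =>
      if (sampled.length : Int) < limit then pvLoopN limit fuel rest sampled else sampled
  | fuel + 1, (sector, t :: tl) :: rest, sampled =>
      if (sampled.length : Int) < limit then
        pvLoopN limit fuel
          ((rest.map (fun p => (p.1, p.2.filter (fun x => !decide (x = t))))) ++
            [(sector, tl.filter (fun x => !decide (x = t)))])
          (sampled ++ [(sector, t)])
      else sampled

def sample_universe_pairs_alt (universe_ : List (String × List String)) (limit : Int) : List (String × String) :=
  if limit ≤ 0 then []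
  else
    let queue := (PySem.Dict.ofList universe_).items   -- initial queue = universe.items() (each `tickers or []` is the list itself)
    pvLoopN limit (queue.length + 2 * limit.toNat + 1) queue []

-- ===== PRECONDITION & SPEC =====
def Spec_sample_universe_pairs (universe_ : List (String × List String)) (limit : Int) (out : List (String × String)) : Prop := out = sample_universe_pairs_alt universe_ limit
instance (universe_ : List (String × List String)) (limit : Int) (out : List (String × String)) : Decidable (Spec_sample_universe_pairs universe_ limit out) := by unfold Spec_sample_universe_pairs; infer_instance

-- ===== CLAIM (what is proved, stated in full; the proofs are below) =====
def Claim_equal_sample_universe_pairs : Prop := ∀ (universe_ : List (String × List String)) (limit : Int), Dom_sample_universe_pairs universe_ limit → Spec_sample_universe_pairs universe_ limit (sample_universe_pairs universe_ limit)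

-- ===== LEMMAS AND PROOFS =====

-- Proof-side middle layer: A's loop reorganised round-by-round over an explicit live list
-- (sector, tickers, position) — A is proved equal to it, and it is proved equal to B.
def pvSkipB (tickers : List String) (seen : PySem.Set String) (i : Nat) : Nat :=
  if h : i < tickers.length then
    if tickers[i] ∈ seen then pvSkipB tickers seen (i + 1) else i
  else i
termination_by tickers.length - i

def pvRoundB (limit : Int) :
    List (String × List String × Nat) → List (String × List String × Nat) →
    PySem.Set String → List (String × String) →
    List (String × String) ⊕ (List (String × List String × Nat) × PySem.Set String × List (String × String))
  | [], nxt, seen, sampled => .inr (nxt, seen, sampled)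
  | (sector, tickers, i) :: rest, nxt, seen, sampled =>
      let i := pvSkipB tickers seen i
      if i = tickers.length then pvRoundB limit rest nxt seen sampled
      else
        let ticker := tickers.getD i ""
        let seen := seen.add ticker
        let sampled := sampled ++ [(sector, ticker)]
        if (sampled.length : Int) = limit then .inl sampled
        else pvRoundB limit rest (nxt ++ [(sector, tickers, i + 1)]) seen sampled

def pvLoopB (limit : Int) :
    Nat → List (String × List String × Nat) → PySem.Set String → List (String × String) →
    List (String × String)
  | 0, _, _, sampled => sampled
  | fuel + 1, live, seen, sampled =>
      if live.isEmpty then sampled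
      else
        match pvRoundB limit live [] seen sampled with
        | .inl out => out
        | .inr (nxt, seen', sampled') => pvLoopB limit fuel nxt seen' sampled'

-- A's pair (offsets, seen) corresponds to the live list over a tail l of the dict's items:
-- each sector of l is either still live with its stored position equal to A's offset,
-- or dropped, in which case every ticker from A's offset on has already been seen.
inductive pvLiveRel (offsets : PySem.Dict String Int) (seen : PySem.Set String) :
    List (String × List String) → List (String × List String × Nat) → Prop
  | nil : pvLiveRel offsets seen [] []
  | keep {s ts rest lv} (i : Nat) :
      offsets.getD s 0 = (i : Int) → i ≤ ts.length →
      pvLiveRel offsets seen rest lv →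
      pvLiveRel offsets seen ((s, ts) :: rest) ((s, ts, i) :: lv)
  | drop {s ts rest lv} :
      0 ≤ offsets.getD s 0 →
      (∀ x ∈ ts.drop (offsets.getD s 0).toNat, x ∈ seen) →
      pvLiveRel offsets seen rest lv →
      pvLiveRel offsets seen ((s, ts) :: rest) lv

theorem pvSkipA_eq_pvSkipB (ts : List String) (seen : PySem.Set String) (i : Nat) :
    pvSkipA ts seen (i : Int) = (pvSkipB ts seen i : Int) := by
  fun_induction pvSkipB ts seen i with
  | case1 i hi hm ih =>
    rw [pvSkipA]
    rw [dif_pos ⟨by exact_mod_cast hi, by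
      rw [PySem.List.pyGetD_natCast, List.getD_eq_getElem ts _ hi]; exact hm⟩]
    exact_mod_cast ih
  | case2 i hi hm =>
    rw [pvSkipA, dif_neg]
    rintro ⟨-, hmem⟩
    rw [PySem.List.pyGetD_natCast, List.getD_eq_getElem ts _ hi] at hmem
    exact hm hmem
  | case3 i hi =>
    rw [pvSkipA, dif_neg]
    rintro ⟨hlt, -⟩
    exact hi (by exact_mod_cast hlt)

theorem pvSkipB_le (ts : List String) (seen : PySem.Set String) (i : Nat) (h : i ≤ ts.length) :
    pvSkipB ts seen i ≤ ts.length := by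
  fun_induction pvSkipB ts seen i with
  | case1 i hi hm ih => exact ih hi
  | case2 i hi hm => exact le_of_lt hi
  | case3 i hi => exact h

theorem pvSkipA_ge (ts : List String) (seen : PySem.Set String) (i : Int) :
    i ≤ pvSkipA ts seen i := by
  fun_induction pvSkipA ts seen i with
  | case1 i h ih => omega
  | case2 i h => exact le_refl _

theorem pvSkipA_dead (ts : List String) (seen : PySem.Set String) (i : Int) (h0 : 0 ≤ i)
    (h : ∀ x ∈ ts.drop i.toNat, x ∈ seen) : (ts.length : Int) ≤ pvSkipA ts seen i := by
  fun_induction pvSkipA ts seen i with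
  | case1 i hc ih =>
    apply ih (by omega)
    intro x hx
    apply h
    have : (i + 1).toNat = i.toNat + 1 := by omega
    rw [this, ← List.drop_drop] at hx
    exact List.drop_subset _ _ hx
  | case2 i hc =>
    by_contra hlt
    push Not at hlt
    apply hc
    constructor
    · omega
    · have hi : i.toNat < ts.length := by omega
      have hmem : ts[i.toNat] ∈ ts.drop i.toNat := by
        rw [List.drop_eq_getElem_cons hi]; exact List.mem_cons_self
      have hcast : i = ((i.toNat : Nat) : Int) := by omega
      rw [hcast, PySem.List.pyGetD_natCast, List.getD_eq_getElem ts _ hi]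
      exact h _ hmem

theorem pvLiveRel_mono {offsets offsets' : PySem.Dict String Int} {seen seen' : PySem.Set String}
    {l : List (String × List String)} {lv : List (String × List String × Nat)}
    (hrel : pvLiveRel offsets seen l lv)
    (hoff : ∀ s, s ∈ l.map Prod.fst → offsets'.getD s 0 = offsets.getD s 0)
    (hseen : ∀ x, x ∈ seen → x ∈ seen') :
    pvLiveRel offsets' seen' l lv := by
  induction hrel with
  | nil => exact .nil
  | @keep s ts rest lv' i hoffs hile hrest ih =>
    exact .keep i (by rw [hoff s (by simp)]; exact hoffs) hile
      (ih (fun t ht => hoff t (by simp [ht])))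
  | @drop s ts rest lv' h0 hdead hrest ih =>
    have he : offsets'.getD s 0 = offsets.getD s 0 := hoff s (by simp)
    exact .drop (he ▸ h0) (fun x hx => hseen x (hdead x (he ▸ hx)))
      (ih (fun t ht => hoff t (by simp [ht])))

theorem pvRound_rel (u : PySem.Dict String (List String)) (limit : Int)
    (l : List (String × List String)) (lv : List (String × List String × Nat))
    (offsets : PySem.Dict String Int) (seen : PySem.Set String)
    (sampled : List (String × String)) (advanced : Bool) (nxt0 : List (String × List String × Nat))
    (hrel : pvLiveRel offsets seen l lv)
    (hget : ∀ p ∈ l, u.get? p.1 = some p.2)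
    (hnd : (l.map Prod.fst).Nodup)
    (hlen : (sampled.length : Int) < limit) :
    (∃ offsets' seen' sampled',
        pvRoundA u limit (l.map Prod.fst) offsets seen sampled advanced
          = (offsets', seen', sampled', true) ∧
        pvRoundB limit lv nxt0 seen sampled = .inl sampled' ∧
        limit ≤ (sampled'.length : Int))
    ∨ (∃ offsets' seen' sampled' Δ,
        pvRoundA u limit (l.map Prod.fst) offsets seen sampled advanced
          = (offsets', seen', sampled', advanced || !Δ.isEmpty) ∧
        pvRoundB limit lv nxt0 seen sampled = .inr (nxt0 ++ Δ, seen', sampled') ∧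
        pvLiveRel offsets' seen' l Δ ∧
        (∀ s, s ∉ l.map Prod.fst → offsets'.getD s 0 = offsets.getD s 0) ∧
        (sampled'.length : Int) < limit) := by
  induction l generalizing lv offsets seen sampled advanced nxt0 with
  | nil =>
    cases hrel
    exact Or.inr ⟨offsets, seen, sampled, [],
      by simp [pvRoundA], by simp [pvRoundB], .nil, fun _ _ => rfl, hlen⟩
  | cons p rest ih =>
    obtain ⟨s, ts⟩ := p
    have hts : u.get? s = some ts := hget (s, ts) (by simp)
    have hnds : s ∉ rest.map Prod.fst ∧ (rest.map Prod.fst).Nodup :=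
      List.nodup_cons.mp (by simpa using hnd)
    have hsrest : s ∉ rest.map Prod.fst := hnds.1
    have hnd' : (rest.map Prod.fst).Nodup := hnds.2
    have hget' : ∀ p ∈ rest, u.get? p.1 = some p.2 := fun p hp => hget p (by simp [hp])
    have hAstep : ∀ off0 adv0 smp0 sn0, pvRoundA u limit ((s :: rest.map Prod.fst)) off0 sn0 smp0 adv0 =
        (let tickers := (u.get? s).getD [];
         let index := pvSkipA tickers sn0 (off0.getD s 0);
         let off1 := off0.insert s index;
         if (tickers.length : Int) ≤ index then pvRoundA u limit (rest.map Prod.fst) off1 sn0 smp0 adv0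
         else
           let ticker := PySem.List.pyGetD tickers index "";
           let off2 := off1.insert s (index + 1);
           let sn1 := sn0.add ticker;
           let smp1 := smp0 ++ [(s, ticker)];
           if limit ≤ (smp1.length : Int) then (off2, sn1, smp1, true)
           else pvRoundA u limit (rest.map Prod.fst) off2 sn1 smp1 true) :=
      fun _ _ _ _ => rfl
    cases hrel with
    | @keep _ _ _ lv i hoff hile hrest =>
      have hA : pvSkipA ts seen (offsets.getD s 0) = ((pvSkipB ts seen i : Nat) : Int) := by
        rw [hoff]; exact pvSkipA_eq_pvSkipB ts seen i
      set i' := pvSkipB ts seen i with hi'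
      have hle : i' ≤ ts.length := pvSkipB_le ts seen i hile
      by_cases hd : i' = ts.length
      · -- sector exhausted: A continues, the live list drops it
        have hframe1 : ∀ t ∈ rest.map Prod.fst, (offsets.insert s ((i' : Nat) : Int)).getD t 0 = offsets.getD t 0 :=
          fun t ht => PySem.Dict.getD_insert_of_ne _ _ _ (fun he => hsrest (he ▸ ht))
        have hrel1 := pvLiveRel_mono hrest hframe1 (fun x hx => hx)
        have hAgo : pvRoundA u limit ((s :: rest.map Prod.fst)) offsets seen sampled advanced =
            pvRoundA u limit (rest.map Prod.fst) (offsets.insert s ((i' : Nat) : Int)) seen sampled advanced := by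
          rw [hAstep]; simp only [hts, Option.getD_some, hA]
          rw [if_pos (by exact_mod_cast le_of_eq hd.symm)]
        have hBgo : pvRoundB limit ((s, ts, i) :: lv) nxt0 seen sampled =
            pvRoundB limit lv nxt0 seen sampled := by
          simp only [pvRoundB]; rw [← hi', if_pos hd]
        rcases ih lv (offsets.insert s ((i' : Nat) : Int)) seen sampled advanced nxt0 hrel1 hget' hnd' hlen with
          ⟨o', sn', sp', hAeq, hBeq, hlim⟩ | ⟨o', sn', sp', Δ, hAeq, hBeq, hrel', hframe, hlen'⟩
        · exact Or.inl ⟨o', sn', sp', by rw [List.map_cons, hAgo]; exact hAeq, by rw [hBgo]; exact hBeq, hlim⟩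
        · refine Or.inr ⟨o', sn', sp', Δ, by rw [List.map_cons, hAgo]; exact hAeq, by rw [hBgo]; exact hBeq, ?_, ?_, hlen'⟩
          · refine .drop ?_ ?_ hrel'
            · rw [hframe s hsrest, PySem.Dict.getD_insert_self]; positivity
            · rw [hframe s hsrest, PySem.Dict.getD_insert_self]
              intro x hx
              rw [show ((i' : Nat) : Int).toNat = ts.length by omega, List.drop_length] at hx
              cases hx
          · intro t ht
            rw [hframe t (fun h => ht (by simp [h])),
              PySem.Dict.getD_insert_of_ne _ _ _ (fun he => ht (by simp [he]))]
      · -- live sector: both sample ts[i']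
        have hlt : i' < ts.length := lt_of_le_of_ne hle hd
        have htick : PySem.List.pyGetD ts ((i' : Nat) : Int) "" = ts.getD i' "" :=
          PySem.List.pyGetD_natCast ts i' ""
        have hnotle : ¬ (ts.length : Int) ≤ ((i' : Nat) : Int) := by exact_mod_cast not_le.mpr hlt
        have hlen1 : ((sampled ++ [(s, ts.getD i' "")]).length : Int) = (sampled.length : Int) + 1 := by
          simp
        by_cases hbreak : ((sampled ++ [(s, ts.getD i' "")]).length : Int) = limit
        · -- limit reached: A breaks, the round returns
          refine Or.inl ⟨(offsets.insert s ((i' : Nat) : Int)).insert s (((i' : Nat) : Int) + 1),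
            seen.add (ts.getD i' ""), sampled ++ [(s, ts.getD i' "")], ?_, ?_, le_of_eq hbreak.symm⟩
          · rw [List.map_cons, hAstep]; simp only [hts, Option.getD_some, hA, htick]
            rw [if_neg hnotle, if_pos (le_of_eq hbreak.symm)]
          · simp only [pvRoundB]; rw [← hi', if_neg hd, if_pos hbreak]
        · have hlen1' : ((sampled ++ [(s, ts.getD i' "")]).length : Int) < limit := by
            rw [hlen1] at hbreak ⊢; omega
          have hoff2 : (offsets.insert s ((i' : Nat) : Int)).insert s (((i' : Nat) : Int) + 1)
              = offsets.insert s (((i' : Nat) : Int) + 1) := PySem.Dict.insert_insert_self _ _ _ _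
          have hframe1 : ∀ t ∈ rest.map Prod.fst,
              (offsets.insert s (((i' : Nat) : Int) + 1)).getD t 0 = offsets.getD t 0 :=
            fun t ht => PySem.Dict.getD_insert_of_ne _ _ _ (fun he => hsrest (he ▸ ht))
          have hrel1 := pvLiveRel_mono hrest hframe1
            (fun x hx => (PySem.Set.mem_add seen (ts.getD i' "") x).mpr (Or.inl hx))
          have hAgo : pvRoundA u limit ((s :: rest.map Prod.fst)) offsets seen sampled advanced =
              pvRoundA u limit (rest.map Prod.fst) (offsets.insert s (((i' : Nat) : Int) + 1))
                (seen.add (ts.getD i' "")) (sampled ++ [(s, ts.getD i' "")]) true := by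
            rw [hAstep]; simp only [hts, Option.getD_some, hA, htick]
            rw [if_neg hnotle, if_neg (by rw [hlen1] at hbreak ⊢; omega), hoff2]
          have hBgo : pvRoundB limit ((s, ts, i) :: lv) nxt0 seen sampled =
              pvRoundB limit lv (nxt0 ++ [(s, ts, i' + 1)]) (seen.add (ts.getD i' ""))
                (sampled ++ [(s, ts.getD i' "")]) := by
            simp only [pvRoundB]; rw [← hi', if_neg hd, if_neg hbreak]
          rcases ih lv (offsets.insert s (((i' : Nat) : Int) + 1)) (seen.add (ts.getD i' ""))
              (sampled ++ [(s, ts.getD i' "")]) true (nxt0 ++ [(s, ts, i' + 1)]) hrel1 hget' hnd' hlen1' with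
            ⟨o', sn', sp', hAeq, hBeq, hlim⟩ | ⟨o', sn', sp', Δ, hAeq, hBeq, hrel', hframe, hlen'⟩
          · exact Or.inl ⟨o', sn', sp', by rw [List.map_cons, hAgo]; exact hAeq,
              by rw [hBgo]; exact hBeq, hlim⟩
          · refine Or.inr ⟨o', sn', sp', (s, ts, i' + 1) :: Δ,
              by rw [List.map_cons, hAgo, hAeq]; simp,
              by rw [hBgo, hBeq]; simp, ?_, ?_, hlen'⟩
            · refine .keep (i' + 1) ?_ (by omega) hrel'
              rw [hframe s hsrest, PySem.Dict.getD_insert_self]; push_cast; ring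
            · intro t ht
              rw [hframe t (fun h => ht (by simp [h])),
                PySem.Dict.getD_insert_of_ne _ _ _ (fun he => ht (by simp [he]))]
    | @drop _ _ _ lv h0 hdead hrest =>
      have hskip : (ts.length : Int) ≤ pvSkipA ts seen (offsets.getD s 0) :=
        pvSkipA_dead ts seen _ h0 hdead
      have hskip0 : 0 ≤ pvSkipA ts seen (offsets.getD s 0) :=
        le_trans h0 (pvSkipA_ge ts seen _)
      set idx := pvSkipA ts seen (offsets.getD s 0) with hidx
      have hframe1 : ∀ t ∈ rest.map Prod.fst, (offsets.insert s idx).getD t 0 = offsets.getD t 0 :=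
        fun t ht => PySem.Dict.getD_insert_of_ne _ _ _ (fun he => hsrest (he ▸ ht))
      have hrel1 := pvLiveRel_mono hrest hframe1 (fun x hx => hx)
      have hAgo : pvRoundA u limit ((s :: rest.map Prod.fst)) offsets seen sampled advanced =
          pvRoundA u limit (rest.map Prod.fst) (offsets.insert s idx) seen sampled advanced := by
        rw [hAstep]; simp only [hts, Option.getD_some, ← hidx]
        rw [if_pos hskip]
      rcases ih lv (offsets.insert s idx) seen sampled advanced nxt0 hrel1 hget' hnd' hlen with
        ⟨o', sn', sp', hAeq, hBeq, hlim⟩ | ⟨o', sn', sp', Δ, hAeq, hBeq, hrel', hframe, hlen'⟩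
      · exact Or.inl ⟨o', sn', sp', by rw [List.map_cons, hAgo]; exact hAeq, hBeq, hlim⟩
      · refine Or.inr ⟨o', sn', sp', Δ, by rw [List.map_cons, hAgo]; exact hAeq, hBeq, ?_, ?_, hlen'⟩
        · refine .drop ?_ ?_ hrel'
          · rw [hframe s hsrest, PySem.Dict.getD_insert_self]; exact hskip0
          · rw [hframe s hsrest, PySem.Dict.getD_insert_self]
            intro x hx
            have : ts.length ≤ idx.toNat := by omega
            rw [List.drop_eq_nil_of_le this] at hx
            cases hx
        · intro t ht
          rw [hframe t (fun h => ht (by simp [h])),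
            PySem.Dict.getD_insert_of_ne _ _ _ (fun he => ht (by simp [he]))]

theorem pvLoopB_nil (limit : Int) (fuel : Nat) (seen : PySem.Set String)
    (sampled : List (String × String)) : pvLoopB limit fuel [] seen sampled = sampled := by
  cases fuel <;> simp [pvLoopB]

theorem pvLoopA_done (u : PySem.Dict String (List String)) (limit : Int)
    (names : List String) (fuel : Nat) (offsets : PySem.Dict String Int)
    (seen : PySem.Set String) (sampled : List (String × String))
    (h : limit ≤ (sampled.length : Int)) :
    pvLoopA u limit names fuel offsets seen sampled = sampled := by
  cases fuel with
  | zero => rfl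
  | succ f => rw [pvLoopA, if_neg (not_lt.mpr h)]

theorem pvLoop_rel (u : PySem.Dict String (List String)) (limit : Int) (fuel : Nat)
    (l : List (String × List String)) (lv : List (String × List String × Nat))
    (offsets : PySem.Dict String Int) (seen : PySem.Set String)
    (sampled : List (String × String))
    (hrel : pvLiveRel offsets seen l lv)
    (hget : ∀ p ∈ l, u.get? p.1 = some p.2)
    (hnd : (l.map Prod.fst).Nodup)
    (hlen : (sampled.length : Int) < limit) :
    pvLoopA u limit (l.map Prod.fst) fuel offsets seen sampled
      = pvLoopB limit fuel lv seen sampled := by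
  induction fuel generalizing lv offsets seen sampled with
  | zero => rfl
  | succ f ihf =>
    rcases pvRound_rel u limit l lv offsets seen sampled false [] hrel hget hnd hlen with
      ⟨o', sn', sp', hAeq, hBeq, hlim⟩ | ⟨o', sn', sp', Δ, hAeq, hBeq, hrel', hframe, hlen'⟩
    · have hlv : lv ≠ [] := by
        intro h; subst h; rw [show pvRoundB limit [] [] seen sampled = .inr ([], seen, sampled) from rfl] at hBeq
        cases hBeq
      rw [pvLoopA, if_pos hlen, hAeq, pvLoopB,
        if_neg (by simpa [List.isEmpty_iff] using hlv), hBeq]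
      simp only
      exact pvLoopA_done u limit _ f o' sn' sp' hlim
    · rw [List.nil_append] at hBeq
      by_cases hlv : lv = []
      · subst hlv
        have : pvRoundB limit [] [] seen sampled = .inr ([], seen, sampled) := rfl
        rw [this] at hBeq
        obtain ⟨hΔ, hsn, hsp⟩ : Δ = [] ∧ seen = sn' ∧ sampled = sp' := by
          cases hBeq; exact ⟨rfl, rfl, rfl⟩
        rw [pvLoopA, if_pos hlen, hAeq, pvLoopB]
        simp [hΔ, hsp]
      · rw [pvLoopA, if_pos hlen, hAeq, pvLoopB,
          if_neg (by simpa [List.isEmpty_iff] using hlv), hBeq]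
        cases hΔ : Δ.isEmpty
        · simpa [hΔ] using ihf Δ o' sn' sp' hrel' hlen'
        · simp [List.isEmpty_iff.mp hΔ, pvLoopB_nil]

theorem pvOffsets0 (names : List String) (d : PySem.Dict String Int)
    (h : ∀ s, d.getD s 0 = 0) (s : String) :
    (names.foldl (fun d s => d.insert s (0 : Int)) d).getD s 0 = 0 := by
  induction names generalizing d with
  | nil => exact h s
  | cons n rest ih =>
    exact ih _ (fun t => by rw [PySem.Dict.getD_insert]; split <;> simp [h])

theorem pvLiveRel_init (offsets : PySem.Dict String Int) (seen : PySem.Set String)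
    (h : ∀ s, offsets.getD s 0 = 0) (l : List (String × List String)) :
    pvLiveRel offsets seen l (l.map fun p => (p.1, p.2, (0 : Nat))) := by
  induction l with
  | nil => exact .nil
  | cons p rest ih => exact .keep 0 (h p.1) (Nat.zero_le _) ih

-- ===== live-list ↔ rotating-queue correspondence (old B-layer = port B) =====

-- the queue entry a live-list entry denotes: the not-yet-seen tickers from position i on
def pvQEnt (seen : PySem.Set String) (e : String × List String × Nat) : String × List String :=
  (e.1, (e.2.1.drop e.2.2).filter (fun x => !decide (x ∈ seen)))

theorem pvFilter_add (ts : List String) (seen : PySem.Set String) (t : String) :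
    (ts.filter (fun x => !decide (x ∈ seen))).filter (fun x => !decide (x = t))
      = ts.filter (fun x => !decide (x ∈ seen.add t)) := by
  rw [List.filter_filter]
  apply List.filter_congr
  intro x _
  by_cases h1 : x ∈ seen <;> by_cases h2 : x = t <;>
    simp [h1, h2, PySem.Set.mem_add]

theorem pvQEnt_add (seen : PySem.Set String) (t : String) (e : String × List String × Nat) :
    ((pvQEnt seen e).1, (pvQEnt seen e).2.filter (fun x => !decide (x = t)))
      = pvQEnt (seen.add t) e := by
  simp only [pvQEnt, pvFilter_add]

theorem pvSkipB_filter_eq (ts : List String) (seen : PySem.Set String) (i : Nat) :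
    (ts.drop (pvSkipB ts seen i)).filter (fun x => !decide (x ∈ seen))
      = (ts.drop i).filter (fun x => !decide (x ∈ seen)) := by
  fun_induction pvSkipB ts seen i with
  | case1 i hi hm ih =>
    rw [ih, List.drop_eq_getElem_cons hi, List.filter_cons]
    simp [hm]
  | case2 i hi hm => rfl
  | case3 i hi => rfl

theorem pvSkipB_not_mem (ts : List String) (seen : PySem.Set String) (i : Nat)
    (h : pvSkipB ts seen i < ts.length) : ts[pvSkipB ts seen i]'h ∉ seen := by
  fun_induction pvSkipB ts seen i with
  | case1 i hi hm ih => exact ih h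
  | case2 i hi hm => exact hm
  | case3 i hi => omega

theorem pvLoopN_stop (limit : Int) (fuel : Nat) (q : List (String × List String))
    (sampled : List (String × String)) (h : ¬ (sampled.length : Int) < limit) :
    pvLoopN limit fuel q sampled = sampled := by
  cases fuel with
  | zero => rfl
  | succ f =>
    cases q with
    | nil => rfl
    | cons p rest =>
      obtain ⟨s, ts⟩ := p
      cases ts with
      | nil => rw [pvLoopN, if_neg h]
      | cons t tl => rw [pvLoopN, if_neg h]

theorem pvLoopN_nil (limit : Int) (fuel : Nat) (sampled : List (String × String)) :
    pvLoopN limit fuel [] sampled = sampled := by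
  cases fuel <;> rfl

-- one pvRoundB pass, seen from the rotating queue
theorem pvRoundN_rel (limit : Int) (fuel : Nat) (live nxt : List (String × List String × Nat))
    (seen : PySem.Set String) (sampled : List (String × String))
    (hlen : (sampled.length : Int) < limit)
    (hib : ∀ e ∈ live, e.2.2 ≤ e.2.1.length) :
    pvLoopN limit (live.length + fuel) (live.map (pvQEnt seen) ++ nxt.map (pvQEnt seen)) sampled
      = (match pvRoundB limit live nxt seen sampled with
         | .inl out => out
         | .inr (nxt', seen', sampled') => pvLoopN limit fuel (nxt'.map (pvQEnt seen')) sampled') := by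
  induction live generalizing nxt seen sampled with
  | nil => simp [pvRoundB]
  | cons e rest ih =>
    obtain ⟨s, ts, i⟩ := e
    have hi : i ≤ ts.length := hib (s, ts, i) (by simp)
    have hib' : ∀ e ∈ rest, e.2.2 ≤ e.2.1.length := fun e he => hib e (by simp [he])
    set j := pvSkipB ts seen i with hj
    have hjle : j ≤ ts.length := pvSkipB_le ts seen i hi
    have hhead : pvQEnt seen (s, ts, i) = (s, (ts.drop j).filter (fun x => !decide (x ∈ seen))) := by
      simp only [pvQEnt]
      rw [hj, pvSkipB_filter_eq]
    by_cases hd : j = ts.length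
    · -- exhausted entry: the queue entry is empty and gets dropped
      have hnilq : pvQEnt seen (s, ts, i) = (s, []) := by
        rw [hhead, hd, List.drop_length, List.filter_nil]
      have hfl : ((s, ts, i) :: rest : List (String × List String × Nat)).length + fuel
          = (rest.length + fuel) + 1 := by simp only [List.length_cons]; omega
      rw [hfl, List.map_cons, hnilq, List.cons_append, pvLoopN, if_pos hlen]
      have hB : pvRoundB limit ((s, ts, i) :: rest) nxt seen sampled
          = pvRoundB limit rest nxt seen sampled := by
        simp only [pvRoundB]; rw [← hj, if_pos hd]
      rw [hB]
      exact ih nxt seen sampled hlen hib'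
    · -- live entry: its queue list starts with ts[j], which both sides emit
      have hjlt : j < ts.length := lt_of_le_of_ne hjle hd
      have hnm : ts[j] ∉ seen := pvSkipB_not_mem ts seen i hjlt
      set t := ts.getD j "" with ht
      have htj : ts[j] = t := by rw [ht, List.getD_eq_getElem ts _ hjlt]
      have hheadc : pvQEnt seen (s, ts, i)
          = (s, t :: (ts.drop (j + 1)).filter (fun x => !decide (x ∈ seen))) := by
        rw [hhead, List.drop_eq_getElem_cons hjlt, List.filter_cons]
        simp [htj ▸ hnm, htj]
      have hB : pvRoundB limit ((s, ts, i) :: rest) nxt seen sampled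
          = (if ((sampled ++ [(s, t)]).length : Int) = limit then .inl (sampled ++ [(s, t)])
             else pvRoundB limit rest (nxt ++ [(s, ts, j + 1)]) (seen.add t) (sampled ++ [(s, t)])) := by
        simp only [pvRoundB]; rw [← hj, if_neg hd, ← ht]
      have hfl : ((s, ts, i) :: rest : List (String × List String × Nat)).length + fuel
          = (rest.length + fuel) + 1 := by simp only [List.length_cons]; omega
      rw [hfl, List.map_cons, hheadc, List.cons_append, pvLoopN, if_pos hlen, hB]
      by_cases hbr : ((sampled ++ [(s, t)]).length : Int) = limit
      · rw [if_pos hbr]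
        exact pvLoopN_stop limit _ _ _ (by rw [hbr]; exact lt_irrefl _)
      · rw [if_neg hbr]
        have hlen' : ((sampled ++ [(s, t)]).length : Int) < limit := by
          simp only [List.length_append, List.length_cons, List.length_nil] at hbr ⊢
          push_cast at hbr ⊢; omega
        have hib'' : ∀ e ∈ rest, e.2.2 ≤ e.2.1.length := hib'
        have hq : ((rest.map (pvQEnt seen) ++ nxt.map (pvQEnt seen)).map
              (fun p => (p.1, p.2.filter (fun x => !decide (x = t)))) ++
              [(s, ((ts.drop (j + 1)).filter (fun x => !decide (x ∈ seen))).filter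
                (fun x => !decide (x = t)))])
            = rest.map (pvQEnt (seen.add t)) ++ (nxt ++ [(s, ts, j + 1)]).map (pvQEnt (seen.add t)) := by
          rw [List.map_append, List.map_map, List.map_map, List.map_append]
          have hmap : ∀ (l : List (String × List String × Nat)),
              l.map ((fun p => (p.1, p.2.filter (fun x => !decide (x = t)))) ∘ pvQEnt seen)
                = l.map (pvQEnt (seen.add t)) := by
            intro l
            apply List.map_congr_left
            intro e _
            simpa using pvQEnt_add seen t e
          rw [hmap, hmap, List.append_assoc]
          congr 1
          congr 1
          simp only [List.map_cons, List.map_nil, pvQEnt, pvFilter_add]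
        rw [hq]
        exact ih (nxt ++ [(s, ts, j + 1)]) (seen.add t) (sampled ++ [(s, t)]) hlen' hib''

-- facts about a round that continues: sampled grows with the kept entries, limit not reached,
-- and every kept entry's position stays in range
theorem pvRoundB_inr_facts (limit : Int) (live : List (String × List String × Nat)) :
    ∀ nxt seen sampled nxt' seen' sampled',
    pvRoundB limit live nxt seen sampled = .inr (nxt', seen', sampled') →
    nxt'.length + sampled.length ≤ nxt.length + sampled'.length ∧
    sampled.length ≤ sampled'.length ∧
    ((sampled.length : Int) < limit → (sampled'.length : Int) < limit) ∧
    ((∀ e ∈ live, e.2.2 ≤ e.2.1.length) → (∀ e ∈ nxt, e.2.2 ≤ e.2.1.length) →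
      ∀ e ∈ nxt', e.2.2 ≤ e.2.1.length) := by
  induction live with
  | nil =>
    intro nxt seen sampled nxt' seen' sampled' h
    simp only [pvRoundB] at h
    obtain ⟨h1, h2, h3⟩ : nxt = nxt' ∧ seen = seen' ∧ sampled = sampled' := by
      cases h; exact ⟨rfl, rfl, rfl⟩
    subst h1; subst h3
    exact ⟨le_refl _, le_refl _, fun h => h, fun _ hn => hn⟩
  | cons e rest ih =>
    obtain ⟨s, ts, i⟩ := e
    intro nxt seen sampled nxt' seen' sampled' h
    simp only [pvRoundB] at h
    set j := pvSkipB ts seen i with hj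
    by_cases hd : j = ts.length
    · rw [if_pos hd] at h
      obtain ⟨h1, h2, h3, h4⟩ := ih nxt seen sampled nxt' seen' sampled' h
      exact ⟨h1, h2, h3, fun hl hn => h4 (fun e he => hl e (by simp [he])) hn⟩
    · rw [if_neg hd] at h
      by_cases hbr : (((sampled ++ [(s, ts.getD j "")]).length : Int) = limit)
      · rw [if_pos hbr] at h; cases h
      · rw [if_neg hbr] at h
        obtain ⟨h1, h2, h3, h4⟩ :=
          ih (nxt ++ [(s, ts, j + 1)]) (seen.add (ts.getD j "")) (sampled ++ [(s, ts.getD j "")])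
            nxt' seen' sampled' h
        simp only [List.length_append, List.length_cons, List.length_nil] at h1 h2 h3
        refine ⟨by omega, by omega, ?_, ?_⟩
        · intro hlt
          apply h3
          simp only [List.length_append, List.length_cons, List.length_nil] at hbr
          push_cast at hbr ⊢; omega
        · intro hl hn
          apply h4 (fun e he => hl e (by simp [he]))
          intro e he
          rcases List.mem_append.mp he with he | he
          · exact hn e he
          · have hi : i ≤ ts.length := hl (s, ts, i) (by simp)
            have : e = (s, ts, j + 1) := by simpa using he
            subst this
            have := pvSkipB_le ts seen i hi
            simp only
            omega

-- the old fuel loop and the queue's fuel loop compute the same fixpoint under adequate fuel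
theorem pvLoopB_eq_pvLoopN (limit : Int) (fuelB : Nat) :
    ∀ (fuelN : Nat) live seen sampled,
    (sampled.length : Int) < limit →
    (∀ e ∈ live, e.2.2 ≤ e.2.1.length) →
    (limit - (sampled.length : Int)).toNat + 1 ≤ fuelB →
    live.length + 2 * (limit - (sampled.length : Int)).toNat ≤ fuelN →
    pvLoopB limit fuelB live seen sampled = pvLoopN limit fuelN (live.map (pvQEnt seen)) sampled := by
  induction fuelB with
  | zero => intro fuelN live seen sampled hlen _ hfB _; omega
  | succ f ihf =>
    intro fuelN live seen sampled hlen hib hfB hfN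
    rw [pvLoopB]
    by_cases hlv : live = []
    · subst hlv
      simp only [List.isEmpty_nil, if_true]
      rw [List.map_nil, pvLoopN_nil]
    · rw [if_neg (by simpa [List.isEmpty_iff] using hlv)]
      obtain ⟨fuelN', hsplit⟩ : ∃ fuelN', fuelN = live.length + fuelN' :=
        ⟨fuelN - live.length, by omega⟩
      have hrd := pvRoundN_rel limit fuelN' live [] seen sampled hlen hib
      rw [List.map_nil, List.append_nil] at hrd
      rw [hsplit]
      cases hB : pvRoundB limit live [] seen sampled with
      | inl out => rw [hB] at hrd; rw [hrd]
      | inr r =>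
        obtain ⟨nxt', seen', sampled'⟩ := r
        rw [hB] at hrd
        rw [hrd]
        show pvLoopB limit f nxt' seen' sampled' = pvLoopN limit fuelN' (nxt'.map (pvQEnt seen')) sampled'
        obtain ⟨h1, h2, h3, h4⟩ := pvRoundB_inr_facts limit live [] seen sampled nxt' seen' sampled' hB
        by_cases hn : nxt' = []
        · subst hn
          rw [pvLoopB_nil, List.map_nil, pvLoopN_nil]
        · have hlen' : (sampled'.length : Int) < limit := h3 hlen
          have hgrow : nxt'.length + sampled.length ≤ sampled'.length := by
            simp only [List.length_nil] at h1
            omega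
          have hne : 1 ≤ nxt'.length := List.length_pos_iff.mpr hn
          exact ihf fuelN' nxt' seen' sampled' hlen'
            (h4 hib (by intro e he; cases he)) (by omega) (by omega)

-- ===== VERDICT (by name: the statement is the Claim_ definition above) =====
theorem sample_universe_pairs_spec : Claim_equal_sample_universe_pairs := by
  intro universe_ limit _
  unfold Spec_sample_universe_pairs sample_universe_pairs sample_universe_pairs_alt
  by_cases hl : limit ≤ 0
  · rw [if_pos hl, if_pos hl]
  · rw [if_neg hl, if_neg hl]
    have hnd : ((PySem.Dict.ofList universe_).items.map Prod.fst).Nodup :=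
      PySem.Dict.nodup_keys_ofList universe_
    have hget : ∀ p ∈ (PySem.Dict.ofList universe_).items,
        (PySem.Dict.ofList universe_).get? p.1 = some p.2 := by
      intro p hp
      exact PySem.Dict.get?_of_mem_items _ (by rwa [← Prod.mk.eta (p := p)] at hp)
        (PySem.Dict.nodup_keys_ofList universe_)
    have h0 : ∀ s, ((PySem.Dict.ofList universe_).keys.foldl
        (fun d s => d.insert s (0 : Int)) PySem.Dict.empty).getD s 0 = 0 :=
      pvOffsets0 _ _ (fun s => PySem.Dict.getD_empty s 0)
    have hAB : pvLoopA (PySem.Dict.ofList universe_) limit (PySem.Dict.ofList universe_).keys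
          (limit.toNat + 1) _ PySem.Set.empty []
        = pvLoopB limit (limit.toNat + 1)
            ((PySem.Dict.ofList universe_).items.map fun p => (p.1, p.2, (0 : Nat)))
            PySem.Set.empty [] :=
      pvLoop_rel (PySem.Dict.ofList universe_) limit (limit.toNat + 1)
        (PySem.Dict.ofList universe_).items _ _ PySem.Set.empty []
        (pvLiveRel_init _ _ h0 _) hget hnd (by simp; omega)
    have hBN : pvLoopB limit (limit.toNat + 1)
          ((PySem.Dict.ofList universe_).items.map fun p => (p.1, p.2, (0 : Nat)))
          PySem.Set.empty []
        = pvLoopN limit ((PySem.Dict.ofList universe_).items.length + 2 * limit.toNat + 1)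
            (((PySem.Dict.ofList universe_).items.map fun p => (p.1, p.2, (0 : Nat))).map
              (pvQEnt PySem.Set.empty)) [] := by
      refine pvLoopB_eq_pvLoopN limit (limit.toNat + 1) _ _ PySem.Set.empty []
        (by simp only [List.length_nil, Nat.cast_zero]; omega) ?_
        (by simp only [List.length_nil, Nat.cast_zero]; omega)
        (by simp only [List.length_nil, Nat.cast_zero, List.length_map]; omega)
      intro e he
      simp only [List.mem_map] at he
      obtain ⟨p, -, hp⟩ := he
      subst hp
      exact Nat.zero_le _
    have hinit : (((PySem.Dict.ofList universe_).items.map fun p => (p.1, p.2, (0 : Nat))).map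
          (pvQEnt PySem.Set.empty)) = (PySem.Dict.ofList universe_).items := by
      rw [List.map_map]
      apply List.map_id''
      intro p
      simp [pvQEnt, PySem.Set.empty, Function.comp]
    rw [hAB, hBN, hinit]
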